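-- pv_equiv track=rewrite | github.com/Dainsleif233/MultiJoin | main.py | increment_name
-- ===== SOURCE A (Python) =====
-- import string
--
-- def increment_name(name: str):
--     if not name:
--         return "a"
--
--     chars = list(name)
--     for index in range(len(chars) - 1, -1, -1):
--         char = chars[index]
--         lower_char = char.lower()
--         if lower_char not in string.ascii_lowercase:
--             continue
--         if lower_char == "z":
--             chars[index] = "A" if char.isupper() else "a"
--             continue
--         chars[index] = chr(ord(char) + 1)
--         return "".join(chars)
--
--     chars[-1] = "a"
--     return "".join(chars)
-- ===== SOURCE B (Python) =====
-- def increment_name(name: str):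
--     if not name:
--         return "a"
--     chars = list(name)
--     # pivot: last index holding a letter other than z/Z
--     p = None
--     for j, c in enumerate(chars):
--         lc = c.lower()
--         if "a" <= lc <= "z" and lc != "z":
--             p = j
--     if p is None:
--         # every letter is a z: reset all letters case-preservingly, force last char to 'a'
--         chars = [("A" if c.isupper() else "a") if "a" <= c.lower() <= "z" else c
--                  for c in chars]
--         chars[-1] = "a"
--         return "".join(chars)
--     chars = [("A" if c.isupper() else "a") if j > p and "a" <= c.lower() <= "z" else c
--              for j, c in enumerate(chars)]
--     chars[p] = chr(ord(chars[p]) + 1)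
--     return "".join(chars)
-- ===== Notes on version B (the rewrite author's own statement) =====
-- stated objective: alternative
-- what changed: A scans right-to-left mutating z-letters as it searches and returns early from inside the loop; B first computes the pivot (the last non-z letter) with one forward pass, then rewrites the string in straight-line code: reset the letters after the pivot and increment it, or, with no pivot, case-preservingly reset every letter and force the last character to lowercase a.
import Mathlib
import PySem

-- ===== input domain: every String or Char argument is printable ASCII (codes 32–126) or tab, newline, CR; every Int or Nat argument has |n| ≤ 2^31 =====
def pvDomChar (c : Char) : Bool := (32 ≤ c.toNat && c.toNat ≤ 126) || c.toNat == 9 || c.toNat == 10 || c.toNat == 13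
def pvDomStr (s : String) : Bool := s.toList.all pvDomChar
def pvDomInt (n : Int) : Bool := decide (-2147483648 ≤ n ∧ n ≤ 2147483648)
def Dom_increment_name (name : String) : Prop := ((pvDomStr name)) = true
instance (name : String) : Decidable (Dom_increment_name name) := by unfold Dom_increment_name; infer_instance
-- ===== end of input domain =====

-- B replaces A's right-to-left scan-with-early-return by a pivot computation (last non-z letter)
-- followed by straight-line rewriting; objective: alternative decomposition, same cost.

-- shared character predicates (the very expressions both Pythons write out)
-- `"a" <= c.lower() <= "z"` (c.lower() ∈ string.ascii_lowercase for a single char)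
def pvLett (c : Char) : Bool :=
  decide ('a' ≤ PySem.Chars.lowerChar c) && decide (PySem.Chars.lowerChar c ≤ 'z')
-- `"A" if c.isupper() else "a"`
def pvReset (c : Char) : Char := if PySem.Chars.isupper c then 'A' else 'a'

-- ===== PORT A =====
-- the `for index in range(len(chars)-1,-1,-1)` loop; argument i means the indices index < i remain
def incALoop (chars : List Char) : Nat → (List Char ⊕ String)
  | 0 => Sum.inl chars
  | (i+1) =>
    let char := chars.getD i ' '
    if ¬ (pvLett char = true) then incALoop chars i
    else if PySem.Chars.lowerChar char = 'z' then
      incALoop (chars.set i (pvReset char)) i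
    else
      Sum.inr (String.mk (chars.set i (Char.ofNat (char.toNat + 1))))

def increment_name (name : String) : String :=
  if name = "" then "a"
  else
    let chars := name.toList
    match incALoop chars chars.length with
    | Sum.inr s => s
    | Sum.inl cs => String.mk (cs.set (cs.length - 1) 'a')

-- ===== PORT B =====
def increment_name_alt (name : String) : String :=
  if name = "" then "a"
  else
    let chars := name.toList
    let p := (PySem.List.enumerate chars).foldl
      (fun acc jc => if pvLett jc.2 && !(PySem.Chars.lowerChar jc.2 == 'z') then some jc.1 else acc)
      none
    match p with
    | none =>
      let cs := chars.map (fun c => if pvLett c then pvReset c else c)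
      String.mk (cs.set (cs.length - 1) 'a')
    | some p =>
      let cs := (PySem.List.enumerate chars).map
        (fun jc => if decide (p < jc.1) && pvLett jc.2 then pvReset jc.2 else jc.2)
      String.mk (cs.set p.toNat (Char.ofNat ((cs.getD p.toNat ' ').toNat + 1)))

-- ===== PRECONDITION & SPEC =====
def Spec_increment_name (name : String) (out : String) : Prop := out = increment_name_alt name
instance (name : String) (out : String) : Decidable (Spec_increment_name name out) := by unfold Spec_increment_name; infer_instance

-- ===== CLAIM (what is proved, stated in full; the proofs are below) =====
def Claim_equal_increment_name : Prop := ∀ (name : String), Dom_increment_name name → Spec_increment_name name (increment_name name)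

-- ===== LEMMAS AND PROOFS =====

def pvGood (c : Char) : Bool := pvLett c && !(PySem.Chars.lowerChar c == 'z')

-- pivot of the prefix chars.take i, exactly B's fold
def pvPiv (chars : List Char) (i : Nat) : Option Int :=
  (PySem.List.enumerate (chars.take i)).foldl
    (fun acc jc => if pvLett jc.2 && !(PySem.Chars.lowerChar jc.2 == 'z') then some jc.1 else acc)
    none

-- chars with every letter at an index < i reset (case-preserving)
def pvR (chars : List Char) (i : Nat) : List Char :=
  (PySem.List.enumerate chars).map
    (fun jc => if decide (jc.1 < (i : Int)) && pvLett jc.2 then pvReset jc.2 else jc.2)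

-- chars with every letter at an index in (p, i) reset
def pvR' (chars : List Char) (p : Int) (i : Nat) : List Char :=
  (PySem.List.enumerate chars).map
    (fun jc => if decide (p < jc.1) && decide (jc.1 < (i : Int)) && pvLett jc.2 then pvReset jc.2 else jc.2)

theorem pvPiv_zero (chars : List Char) : pvPiv chars 0 = none := rfl

theorem pvPiv_succ (chars : List Char) (i : Nat) (h : i < chars.length) :
    pvPiv chars (i+1) = if pvGood chars[i] then some (i : Int) else pvPiv chars i := by
  unfold pvPiv
  rw [List.take_add_one, List.getElem?_eq_getElem h]
  simp only [Option.toList_some, PySem.List.enumerate_append, List.foldl_append,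
    List.length_take, PySem.List.enumerate_cons, PySem.List.enumerate_nil, List.foldl_cons,
    List.foldl_nil, pvGood]
  have h2 : min i chars.length = i := by omega
  rw [h2]
  split <;> simp_all

theorem pvPiv_some_lt (chars : List Char) (i : Nat) (p : Int)
    (h : pvPiv chars i = some p) : 0 ≤ p ∧ p < i := by
  induction i with
  | zero => simp [pvPiv_zero] at h
  | succ i ih =>
    by_cases hi : i < chars.length
    · rw [pvPiv_succ chars i hi] at h
      split at h
      · cases h; omega
      · have := ih h; omega
    · have heq : chars.take (i+1) = chars.take i := by
        rw [List.take_of_length_le (by omega), List.take_of_length_le (by omega)]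
      unfold pvPiv at h
      rw [heq] at h
      have := ih h; omega

theorem pvPiv_set (chars : List Char) (i : Nat) (r : Char) :
    pvPiv (chars.set i r) i = pvPiv chars i := by
  unfold pvPiv
  rw [List.take_set_of_le (le_refl i)]

theorem pvR_zero (chars : List Char) : pvR chars 0 = chars := by
  apply List.ext_getElem?
  intro k
  simp only [pvR, List.getElem?_map, PySem.List.getElem?_enumerate]
  cases chars[k]? with
  | none => rfl
  | some c =>
    simp only [Option.map_some, Option.some.injEq]
    split_ifs with h1 <;> simp_all <;> omega

theorem pvR_succ_skip (chars : List Char) (i : Nat) (h : i < chars.length)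
    (hl : pvLett chars[i] = false) : pvR chars (i+1) = pvR chars i := by
  apply List.ext_getElem?
  intro k
  simp only [pvR, List.getElem?_map, PySem.List.getElem?_enumerate]
  cases hk : chars[k]? with
  | none => rfl
  | some c =>
    simp only [Option.map_some, Option.some.injEq]
    by_cases hki : k = i
    · subst hki
      have hc : c = chars[k] := by
        rw [List.getElem?_eq_getElem h] at hk; exact (Option.some.injEq _ _).mp hk.symm
      rw [hc, hl]
      simp
    · split_ifs with h1 h2 <;> simp_all <;> omega

theorem pvR_succ_set (chars : List Char) (i : Nat) (h : i < chars.length)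
    (hl : pvLett chars[i] = true) :
    pvR chars (i+1) = pvR (chars.set i (pvReset chars[i])) i := by
  apply List.ext_getElem?
  intro k
  simp only [pvR, List.getElem?_map, PySem.List.getElem?_enumerate, List.getElem?_set]
  by_cases hki : i = k
  · subst hki
    rw [if_pos rfl, if_pos h, List.getElem?_eq_getElem h]
    simp only [Option.map_some, Option.some.injEq]
    split_ifs with h1 h2 <;> simp_all [pvReset]
  · rw [if_neg hki]
    cases chars[k]? with
    | none => rfl
    | some c =>
      simp only [Option.map_some, Option.some.injEq]
      split_ifs with h1 h2 <;> simp_all <;> omega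

theorem pvR'_succ_skip (chars : List Char) (p : Int) (i : Nat) (h : i < chars.length)
    (hl : pvLett chars[i] = false) : pvR' chars p (i+1) = pvR' chars p i := by
  apply List.ext_getElem?
  intro k
  simp only [pvR', List.getElem?_map, PySem.List.getElem?_enumerate]
  cases hk : chars[k]? with
  | none => rfl
  | some c =>
    simp only [Option.map_some, Option.some.injEq]
    by_cases hki : k = i
    · subst hki
      have hc : c = chars[k] := by
        rw [List.getElem?_eq_getElem h] at hk; exact (Option.some.injEq _ _).mp hk.symm
      rw [hc, hl]
      simp
    · split_ifs with h1 h2 <;> simp_all <;> omega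

theorem pvR'_succ_set (chars : List Char) (p : Int) (i : Nat) (h : i < chars.length)
    (hp : p < i) (hl : pvLett chars[i] = true) :
    pvR' chars p (i+1) = pvR' (chars.set i (pvReset chars[i])) p i := by
  apply List.ext_getElem?
  intro k
  simp only [pvR', List.getElem?_map, PySem.List.getElem?_enumerate, List.getElem?_set]
  by_cases hki : i = k
  · subst hki
    rw [if_pos rfl, if_pos h, List.getElem?_eq_getElem h]
    simp only [Option.map_some, Option.some.injEq]
    split_ifs with h1 h2 <;> simp_all [pvReset]
  · rw [if_neg hki]
    cases chars[k]? with
    | none => rfl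
    | some c =>
      simp only [Option.map_some, Option.some.injEq]
      split_ifs with h1 h2 <;> simp_all <;> omega

theorem pvR'_self (chars : List Char) (i : Nat) :
    pvR' chars (i : Int) (i+1) = chars := by
  apply List.ext_getElem?
  intro k
  simp only [pvR', List.getElem?_map, PySem.List.getElem?_enumerate]
  cases chars[k]? with
  | none => rfl
  | some c =>
    simp only [Option.map_some, Option.some.injEq]
    split_ifs with h1 <;> simp_all <;> omega

theorem pvGetD_set_ne (chars : List Char) (i : Nat) (r : Char) (p : Nat) (hpi : p ≠ i) :
    (chars.set i r).getD p ' ' = chars.getD p ' ' := by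
  simp only [List.getD_eq_getElem?_getD]
  rw [List.getElem?_set_ne (by omega)]

-- the loop invariant: A's scan from index i-1 down equals pivot-then-rewrite on the prefix
theorem pvLoop_eq (i : Nat) : ∀ (chars : List Char), i ≤ chars.length →
    incALoop chars i =
      (match pvPiv chars i with
       | none => Sum.inl (pvR chars i)
       | some p => Sum.inr (String.mk ((pvR' chars p i).set p.toNat
           (Char.ofNat ((chars.getD p.toNat ' ').toNat + 1))))) := by
  induction i with
  | zero => intro chars _; simp [incALoop, pvPiv_zero, pvR_zero]
  | succ i ih =>
    intro chars hlen
    have hi : i < chars.length := by omega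
    have hget : chars.getD i ' ' = chars[i] := by
      simp [List.getD_eq_getElem?_getD, List.getElem?_eq_getElem hi]
    rw [pvPiv_succ chars i hi]
    show (if ¬ (pvLett (chars.getD i ' ') = true) then incALoop chars i
          else if PySem.Chars.lowerChar (chars.getD i ' ') = 'z' then
            incALoop (chars.set i (pvReset (chars.getD i ' '))) i
          else Sum.inr (String.mk (chars.set i (Char.ofNat ((chars.getD i ' ').toNat + 1))))) = _
    rw [hget]
    by_cases hl : pvLett chars[i] = true
    · by_cases hz : PySem.Chars.lowerChar chars[i] = 'z'
      · -- a z-letter: reset it and continue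
        have hgood : pvGood chars[i] = false := by simp [pvGood, hz]
        rw [if_neg (by simp [hl]), if_pos hz, hgood]
        simp only [if_neg (Bool.false_ne_true)]
        have hlen' : i ≤ (chars.set i (pvReset chars[i])).length := by simp; omega
        rw [ih (chars.set i (pvReset chars[i])) hlen', pvPiv_set]
        cases hpv : pvPiv chars i with
        | none =>
          simp only []
          rw [pvR_succ_set chars i hi hl]
        | some p =>
          obtain ⟨hp0, hpi⟩ := pvPiv_some_lt chars i p hpv
          simp only []
          rw [pvR'_succ_set chars p i hi (by omega) hl,
            pvGetD_set_ne chars i (pvReset chars[i]) p.toNat (by omega)]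
      · -- the pivot: increment and return
        have hgood : pvGood chars[i] = true := by simp [pvGood, hl, hz]
        rw [if_neg (by simp [hl]), if_neg hz, hgood]
        simp only [if_true, Int.toNat_natCast, pvR'_self, hget]
    · -- not a letter: skip
      have hgood : pvGood chars[i] = false := by simp [pvGood, hl]
      rw [if_pos (by simp [hl]), hgood]
      simp only [if_neg (Bool.false_ne_true)]
      rw [ih chars (by omega)]
      cases hpv : pvPiv chars i with
      | none => simp only []; rw [pvR_succ_skip chars i hi (by simpa using hl)]
      | some p => simp only []; rw [pvR'_succ_skip chars p i hi (by simpa using hl)]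

theorem pvR_full (chars : List Char) :
    pvR chars chars.length = chars.map (fun c => if pvLett c then pvReset c else c) := by
  apply List.ext_getElem?
  intro k
  simp only [pvR, List.getElem?_map, PySem.List.getElem?_enumerate]
  cases hk : chars[k]? with
  | none => rfl
  | some c =>
    have hkl : k < chars.length := by
      by_contra hc
      rw [List.getElem?_eq_none (by omega)] at hk; cases hk
    simp only [Option.map_some, Option.some.injEq]
    simp [hkl]

theorem pvR'_full (chars : List Char) (p : Int) :
    pvR' chars p chars.length =
      (PySem.List.enumerate chars).map
        (fun jc => if decide (p < jc.1) && pvLett jc.2 then pvReset jc.2 else jc.2) := by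
  apply List.ext_getElem?
  intro k
  simp only [pvR', List.getElem?_map, PySem.List.getElem?_enumerate]
  cases hk : chars[k]? with
  | none => rfl
  | some c =>
    have hkl : k < chars.length := by
      by_contra hc
      rw [List.getElem?_eq_none (by omega)] at hk; cases hk
    simp only [Option.map_some, Option.some.injEq]
    simp [hkl]

theorem pvCs_getD (chars : List Char) (p : Int) (h0 : 0 ≤ p) (hn : p < chars.length) :
    ((PySem.List.enumerate chars).map
        (fun jc => if decide (p < jc.1) && pvLett jc.2 then pvReset jc.2 else jc.2)).getD p.toNat ' '
      = chars.getD p.toNat ' ' := by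
  have hlt : p.toNat < chars.length := by omega
  simp only [List.getD_eq_getElem?_getD, List.getElem?_map, PySem.List.getElem?_enumerate,
    List.getElem?_eq_getElem hlt]
  simp
  exact fun hc => absurd hc (by omega)

-- ===== VERDICT (by name: the statement is the Claim_ definition above) =====
theorem increment_name_spec : Claim_equal_increment_name := by
  intro name _
  unfold Spec_increment_name increment_name increment_name_alt
  by_cases h : name = ""
  · simp [h]
  · simp only [if_neg h]
    have hpiv : (PySem.List.enumerate name.toList).foldl
        (fun acc jc => if pvLett jc.2 && !(PySem.Chars.lowerChar jc.2 == 'z') then some jc.1 else acc)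
        none = pvPiv name.toList name.toList.length := by
      unfold pvPiv; rw [List.take_length]
    rw [pvLoop_eq name.toList.length name.toList (le_refl _), hpiv]
    cases hpv : pvPiv name.toList name.toList.length with
    | none =>
      simp only []
      rw [pvR_full]
    | some p =>
      obtain ⟨hp0, hpn⟩ := pvPiv_some_lt name.toList name.toList.length p hpv
      simp only []
      rw [pvR'_full, pvCs_getD name.toList p hp0 (by omega)]
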